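-- pv_equiv track=rewrite | github.com/canonn-science/Canonn-Plots | plot_neutron_stars.py | _clean_line_for_json
-- ===== SOURCE A (Python) =====
-- def _clean_line_for_json(line):
--     line = line.lstrip()
--     if not line:
--         return line
--     if line == "[" or line == "]":
--         return ""
--     if line.startswith("["):
--         line = line[1:].lstrip()
--     while line.endswith(",") or line.endswith("]"):
--         line = line[:-1].rstrip()
--     return line
-- ===== SOURCE B (Python) =====
-- _WS = " \t\n\r\x0b\x0c"
--
-- def _clean_line_for_json(line):
--     line = line.lstrip()
--     if not line:
--         return line
--     if line in ("[", "]"):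
--         return ""
--     if line.startswith("["):
--         line = line[1:].lstrip()
--     # single backward index scan: cut marks the start of the removable
--     # suffix, i.e. the maximal suffix matching ([,\]]\s*)* read backward
--     i = len(line) - 1
--     cut = len(line)
--     while i >= 0 and line[i] in ",]":
--         i -= 1
--         while i >= 0 and line[i] in _WS:
--             i -= 1
--         cut = i + 1
--     return line[:cut]
-- ===== Notes on version B (the rewrite author's own statement) =====
-- stated objective: alternative
-- what changed: replaces A's repeated endswith/slice/rstrip while-loop, which rebuilds the string on every iteration, with a single backward index scan that computes the cut position once and slices once
import Mathlib
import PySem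

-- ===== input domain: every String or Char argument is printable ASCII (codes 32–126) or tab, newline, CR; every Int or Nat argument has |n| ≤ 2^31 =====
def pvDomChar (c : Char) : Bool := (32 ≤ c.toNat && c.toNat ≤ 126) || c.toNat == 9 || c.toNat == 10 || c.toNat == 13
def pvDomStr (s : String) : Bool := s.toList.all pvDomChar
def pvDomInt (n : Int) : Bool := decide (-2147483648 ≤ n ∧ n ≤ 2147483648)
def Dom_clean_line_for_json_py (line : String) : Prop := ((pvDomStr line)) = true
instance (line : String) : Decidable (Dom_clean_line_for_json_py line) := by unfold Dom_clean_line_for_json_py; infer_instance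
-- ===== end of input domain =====

-- B replaces A's repeated slice-and-rstrip while-loop by a single backward index
-- scan that computes the cut position and slices once (objective: alternative).

-- ===== PORT A =====
-- while line.endswith(",") or line.endswith("]"): line = line[:-1].rstrip()
def pvAStripL (s : List Char) : List Char :=
  if h : (PySem.Chars.endswith s [','] || PySem.Chars.endswith s [']']) = true then
    pvAStripL (PySem.Chars.rstrip (PySem.Chars.slice s none (some (-1))))
  else s
termination_by s.length
decreasing_by
  have hne : s ≠ [] := by
    rintro rfl
    simp [PySem.Chars.endswith, List.isSuffixOf] at h
  have h1 : PySem.Chars.slice s none (some (-1)) = s.dropLast := by simp [pysem]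
  have h2 : (PySem.Chars.rstrip s.dropLast).length ≤ s.dropLast.length := by
    simp only [PySem.Chars.rstrip, List.length_reverse]
    exact (List.length_dropWhile_le _ _).trans (by simp)
  have h3 := List.length_pos_of_ne_nil hne
  have h4 : s.dropLast.length = s.length - 1 := by simp
  rw [h1]
  omega

def clean_line_for_json_py (line : String) : String :=
  let line1 := PySem.Str.lstrip line
  if line1 = "" then line1
  else if line1 = "[" ∨ line1 = "]" then ""
  else
    let line2 := if PySem.Str.startswith line1 "[" = true
                 then PySem.Str.lstrip (PySem.Str.slice line1 (some 1) none)
                 else line1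
    String.ofList (pvAStripL line2.toList)

-- ===== PORT B =====
-- line[i] in <chars>, with the 'i >= 0 and' guard of Source B
def pvWsB (c : Char) : Bool :=
  c == ' ' || c == '\t' || c == '\n' || c == '\r' || c == '\x0b' || c == '\x0c'

def pvDelimB (c : Char) : Bool := c == ',' || c == ']'

def pvCharIs (l : List Char) (i : Int) (p : Char → Bool) : Bool :=
  decide (0 ≤ i) && (match PySem.List.pyGet? l i with
                     | some c => p c
                     | none => false)

-- inner while: while i >= 0 and line[i] in _WS: i -= 1
def pvBInner (l : List Char) (i : Int) : Int :=
  if h : pvCharIs l i pvWsB = true then pvBInner l (i - 1) else i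
termination_by (i + 1).toNat
decreasing_by
  have h0 : 0 ≤ i := by
    by_contra hneg
    simp only [pvCharIs, Bool.and_eq_true, decide_eq_true_eq] at h
    omega
  omega

-- needed by pvBOuter's termination proof
theorem pvBInner_le (l : List Char) (i : Int) : pvBInner l i ≤ i := by
  rw [pvBInner]
  split
  · rename_i h
    have h0 : 0 ≤ i := by
      by_contra hneg
      simp only [pvCharIs, Bool.and_eq_true, decide_eq_true_eq] at h
      omega
    have := pvBInner_le l (i - 1)
    omega
  · omega
termination_by (i + 1).toNat
decreasing_by
  omega

-- outer while: while i >= 0 and line[i] in ",]": i -= 1; <inner>; cut = i + 1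
def pvBOuter (l : List Char) (i cut : Int) : Int :=
  if h : pvCharIs l i pvDelimB = true then
    let j := pvBInner l (i - 1)
    pvBOuter l j (j + 1)
  else cut
termination_by (i + 1).toNat
decreasing_by
  have h0 : 0 ≤ i := by
    by_contra hneg
    simp only [pvCharIs, Bool.and_eq_true, decide_eq_true_eq] at h
    omega
  have hj := pvBInner_le l (i - 1)
  omega

def clean_line_for_json_py_alt (line : String) : String :=
  let line1 := PySem.Str.lstrip line
  if line1 = "" then line1
  else if line1 = "[" ∨ line1 = "]" then ""
  else
    let line2 := if PySem.Str.startswith line1 "[" = true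
                 then PySem.Str.lstrip (PySem.Str.slice line1 (some 1) none)
                 else line1
    let l := line2.toList
    let cut := pvBOuter l ((l.length : Int) - 1) (l.length : Int)
    PySem.Str.slice line2 none (some cut)

-- ===== PRECONDITION & SPEC =====
def Spec_clean_line_for_json_py (line : String) (out : String) : Prop := out = clean_line_for_json_py_alt line
instance (line : String) (out : String) : Decidable (Spec_clean_line_for_json_py line out) := by unfold Spec_clean_line_for_json_py; infer_instance

-- ===== CLAIM (what is proved, stated in full; the proofs are below) =====
def Claim_equal_clean_line_for_json_py : Prop := ∀ (line : String), Dom_clean_line_for_json_py line → Spec_clean_line_for_json_py line (clean_line_for_json_py line)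

-- ===== LEMMAS AND PROOFS =====

theorem pvChar_ext (c d : Char) (h : c.toNat = d.toNat) : c = d :=
  Char.ext (UInt32.toNat_inj.mp h)

theorem pvEndswith_concat (xs : List Char) (c a : Char) :
    PySem.Chars.endswith (xs ++ [c]) [a] = (a == c) := by
  rw [Bool.eq_iff_iff, PySem.Chars.endswith_iff, beq_iff_eq]
  constructor
  · rintro ⟨t, ht⟩
    have := congrArg List.getLast? ht
    simpa using this
  · rintro rfl; exact ⟨xs, rfl⟩

theorem pvRstrip_concat (xs : List Char) (c : Char) :
    PySem.Chars.rstrip (xs ++ [c]) =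
      if PySem.Chars.isspace c then PySem.Chars.rstrip xs else xs ++ [c] := by
  simp only [PySem.Chars.rstrip, List.reverse_append, List.reverse_cons, List.reverse_nil,
    List.nil_append, List.cons_append, List.dropWhile_cons]
  split <;> simp_all

-- on the task's ASCII domain, Source B's whitespace set and Python's rstrip set agree
theorem pvWs_eq (c : Char) (h : pvDomChar c = true) : pvWsB c = PySem.Chars.isspace c := by
  have e : ∀ (d : Char), c = d ↔ c.toNat = d.toNat := fun d => ⟨fun h' => by rw [h'], pvChar_ext c d⟩
  simp only [pvDomChar, Bool.or_eq_true, Bool.and_eq_true, decide_eq_true_eq, beq_iff_eq] at h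
  rw [Bool.eq_iff_iff]
  simp only [pvWsB, PySem.Chars.isspace, Bool.or_eq_true, Bool.and_eq_true, beq_iff_eq,
    decide_eq_true_eq, e, show (' ' : Char).toNat = 32 from rfl, show ('\t' : Char).toNat = 9 from rfl,
    show ('\n' : Char).toNat = 10 from rfl, show ('\r' : Char).toNat = 13 from rfl,
    show ('\x0b' : Char).toNat = 11 from rfl, show ('\x0c' : Char).toNat = 12 from rfl]
  omega

theorem pvBInner_ge (l : List Char) (i : Int) (h : -1 ≤ i) : -1 ≤ pvBInner l i := by
  rw [pvBInner]
  split
  · rename_i hg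
    have h0 : 0 ≤ i := by
      by_contra hneg
      simp only [pvCharIs, Bool.and_eq_true, decide_eq_true_eq] at hg
      omega
    exact pvBInner_ge l (i - 1) (by omega)
  · omega
termination_by (i + 1).toNat
decreasing_by
  omega

theorem pvBOuter_nonneg (l : List Char) (i cut : Int) (hc : 0 ≤ cut) :
    0 ≤ pvBOuter l i cut := by
  rw [pvBOuter]
  split
  · rename_i h
    have h0 : 0 ≤ i := by
      by_contra hneg
      simp only [pvCharIs, Bool.and_eq_true, decide_eq_true_eq] at h
      omega
    have hj1 := pvBInner_le l (i - 1)
    have hj2 : -1 ≤ pvBInner l (i - 1) := pvBInner_ge l (i - 1) (by omega)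
    exact pvBOuter_nonneg l (pvBInner l (i - 1)) (pvBInner l (i - 1) + 1) (by omega)
  · exact hc
termination_by (i + 1).toNat
decreasing_by
  omega

-- inner loop ↔ rstrip of a prefix
theorem pvInner_spec (l : List Char) (hD : ∀ c ∈ l, pvDomChar c = true) :
    ∀ m : Nat, m ≤ l.length →
      PySem.Chars.rstrip (l.take m) = l.take ((pvBInner l ((m : Int) - 1)) + 1).toNat
      ∧ -1 ≤ pvBInner l ((m : Int) - 1) ∧ pvBInner l ((m : Int) - 1) ≤ (m : Int) - 1 := by
  intro m
  induction m with
  | zero =>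
    intro _
    have hb : pvBInner l (((0 : Nat) : Int) - 1) = -1 := by
      rw [pvBInner]
      simp [pvCharIs]
    rw [hb]
    simp [PySem.Chars.rstrip]
  | succ m IH =>
    intro hm
    have hm' : m < l.length := by omega
    have ht : l.take (m + 1) = l.take m ++ [l[m]] := List.take_succ_eq_append_getElem hm'
    have hcast : ((m + 1 : Nat) : Int) - 1 = ((m : Nat) : Int) := by push_cast; ring
    rw [hcast]
    have hguard : pvCharIs l ((m : Nat) : Int) pvWsB = pvWsB l[m] := by
      simp [pvCharIs, PySem.List.pyGet?_natCast, List.getElem?_eq_getElem hm']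
    have hws : pvWsB l[m] = PySem.Chars.isspace l[m] := pvWs_eq _ (hD _ (List.getElem_mem hm'))
    rw [pvBInner, hguard, hws]
    by_cases hsp : PySem.Chars.isspace l[m] = true
    · rw [dif_pos hsp]
      obtain ⟨h1, h2, h3⟩ := IH (by omega)
      refine ⟨?_, by omega, by omega⟩
      rw [ht, pvRstrip_concat, if_pos hsp, h1]
    · rw [dif_neg hsp]
      refine ⟨?_, by omega, by omega⟩
      rw [ht, pvRstrip_concat, if_neg hsp]
      have : (((m : Nat) : Int) + 1).toNat = m + 1 := by omega
      rw [this, ht]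

-- outer loop ↔ A's while loop on a prefix
theorem pvMain (l : List Char) (hD : ∀ c ∈ l, pvDomChar c = true) :
    ∀ n : Nat, n ≤ l.length →
      pvAStripL (l.take n) = l.take (pvBOuter l ((n : Int) - 1) (n : Int)).toNat := by
  intro n
  induction n using Nat.strong_induction_on with
  | _ n IH =>
    intro hn
    cases n with
    | zero =>
      have hb : pvBOuter l (((0 : Nat) : Int) - 1) ((0 : Nat) : Int) = 0 := by
        rw [pvBOuter]
        simp [pvCharIs]
      rw [hb, pvAStripL]
      simp only [List.take_zero]
      rw [dif_neg (by decide)]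
      simp
    | succ m =>
      have hm' : m < l.length := by omega
      have ht : l.take (m + 1) = l.take m ++ [l[m]] := List.take_succ_eq_append_getElem hm'
      have hcast : ((m + 1 : Nat) : Int) - 1 = ((m : Nat) : Int) := by push_cast; ring
      rw [hcast]
      have hAiff : (PySem.Chars.endswith (l.take (m + 1)) [','] || PySem.Chars.endswith (l.take (m + 1)) [']']) = true
          ↔ (l[m] = ',' ∨ l[m] = ']') := by
        rw [ht, pvEndswith_concat, pvEndswith_concat]
        simp only [Bool.or_eq_true, beq_iff_eq]
        constructor
        · rintro (h | h)
          · exact Or.inl h.symm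
          · exact Or.inr h.symm
        · rintro (h | h)
          · exact Or.inl h.symm
          · exact Or.inr h.symm
      have hGuard : pvCharIs l ((m : Nat) : Int) pvDelimB = true ↔ (l[m] = ',' ∨ l[m] = ']') := by
        simp [pvCharIs, PySem.List.pyGet?_natCast, List.getElem?_eq_getElem hm', pvDelimB]
      rw [pvAStripL, pvBOuter]
      by_cases hd : l[m] = ',' ∨ l[m] = ']'
      · rw [dif_pos (hAiff.mpr hd), dif_pos (hGuard.mpr hd)]
        have hsl : PySem.Chars.slice (l.take (m + 1)) none (some (-1)) = l.take m := by
          have h0 : PySem.Chars.slice (l.take (m + 1)) none (some (-1)) = (l.take (m + 1)).dropLast := by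
            simp [pysem]
          rw [h0, ht, List.dropLast_concat]
        obtain ⟨h1, h2, h3⟩ := pvInner_spec l hD m (by omega)
        have hk : (pvBInner l (((m : Nat) : Int) - 1) + 1).toNat < m + 1 := by omega
        have hk2 : (pvBInner l (((m : Nat) : Int) - 1) + 1).toNat ≤ l.length := by omega
        have hIH := IH _ hk hk2
        have e1 : (((pvBInner l (((m : Nat) : Int) - 1) + 1).toNat : Nat) : Int) - 1
            = pvBInner l (((m : Nat) : Int) - 1) := by omega
        have e2 : (((pvBInner l (((m : Nat) : Int) - 1) + 1).toNat : Nat) : Int)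
            = pvBInner l (((m : Nat) : Int) - 1) + 1 := by omega
        rw [e1, e2] at hIH
        rw [hsl, h1]
        exact hIH
      · rw [dif_neg (fun hc => hd (hAiff.mp hc)), dif_neg (fun hc => hd (hGuard.mp hc))]
        have : (((m + 1 : Nat) : Int)).toNat = m + 1 := by omega
        rw [this]

-- the two tails agree: A's loop vs B's cut-and-slice, on a Dom string
theorem pvTail (s : String) (hD : ∀ c ∈ s.toList, pvDomChar c = true) :
    String.ofList (pvAStripL s.toList) =
      PySem.Str.slice s none
        (some (pvBOuter s.toList ((s.toList.length : Int) - 1) (s.toList.length : Int))) := by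
  have hcut0 : 0 ≤ pvBOuter s.toList ((s.toList.length : Int) - 1) (s.toList.length : Int) :=
    pvBOuter_nonneg _ _ _ (by omega)
  have hm := pvMain s.toList hD s.toList.length (le_refl _)
  rw [List.take_length] at hm
  rw [PySem.Str.slice]
  have hsl : PySem.Chars.slice s.toList none
      (some (pvBOuter s.toList ((s.toList.length : Int) - 1) (s.toList.length : Int)))
      = s.toList.take (pvBOuter s.toList ((s.toList.length : Int) - 1) (s.toList.length : Int)).toNat := by
    rw [PySem.Chars.slice_eq_listSlice]
    exact PySem.List.slice_to _ hcut0
  rw [hsl, hm]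

-- ===== VERDICT (by name: the statement is the Claim_ definition above) =====
theorem clean_line_for_json_py_spec : Claim_equal_clean_line_for_json_py := by
  intro line hDom
  have hAll : ∀ c ∈ line.toList, pvDomChar c = true := by
    unfold Dom_clean_line_for_json_py pvDomStr at hDom
    simpa [List.all_eq_true] using hDom
  have hD1 : ∀ c ∈ (PySem.Str.lstrip line).toList, pvDomChar c = true := by
    intro c hc
    rw [PySem.Str.toList_lstrip] at hc
    simp only [PySem.Chars.lstrip] at hc
    exact hAll c ((List.dropWhile_sublist _).subset hc)
  have hD2 : ∀ c ∈ (PySem.Str.lstrip (PySem.Str.slice (PySem.Str.lstrip line) (some 1) none)).toList,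
      pvDomChar c = true := by
    intro c hc
    rw [PySem.Str.toList_lstrip] at hc
    simp only [PySem.Chars.lstrip] at hc
    have hc2 := (List.dropWhile_sublist _).subset hc
    have hts : (PySem.Str.slice (PySem.Str.lstrip line) (some 1) none).toList
        = (PySem.Str.lstrip line).toList.drop 1 := by
      rw [PySem.Str.slice]
      simp only [String.toList_ofList, PySem.Chars.slice_eq_listSlice]
      rw [PySem.List.slice_from _ (by norm_num)]
      norm_num
    rw [hts] at hc2
    exact hD1 c (List.drop_subset _ _ hc2)
  unfold Spec_clean_line_for_json_py
  simp only [clean_line_for_json_py, clean_line_for_json_py_alt]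
  split_ifs with h1 h2 h3
  · rfl
  · rfl
  · exact pvTail _ hD2
  · exact pvTail _ hD1
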